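-- pv_equiv track=rewrite | github.com/Fatma-Chaouech/audioverse | audioverse/utils.py | chunk_and_remove_sfx
-- ===== SOURCE A (Python) =====
-- def chunk_and_remove_sfx(text):
--     chunks_with_sfx = text.split("[")
--     chunks_without_sfx = []
--
--     for chunk_sfx in chunks_with_sfx:
--         index_closing_bracket = chunk_sfx.find("]")
--
--         if index_closing_bracket != -1:
--             remaining_chunk = chunk_sfx[index_closing_bracket + 1 :]
--             if remaining_chunk != "":
--                 chunks_without_sfx.append(remaining_chunk)
--         else:
--             chunks_without_sfx.append(chunk_sfx)
--
--     return chunks_without_sfx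
-- ===== SOURCE B (Python) =====
-- def chunk_and_remove_sfx(text):
--     # One left-to-right scan with a tiny state machine instead of split-then-loop.
--     result = []
--     current = ""
--     saw_bracket = False
--     for ch in text:
--         if ch == "[":
--             if not saw_bracket or current != "":
--                 result.append(current)
--             current = ""
--             saw_bracket = False
--         elif ch == "]":
--             if saw_bracket:
--                 current += ch
--             else:
--                 saw_bracket = True
--                 current = ""
--         else:
--             current += ch
--     if not saw_bracket or current != "":
--         result.append(current)
--     return result
-- ===== Notes on version B (the rewrite author's own statement) =====
-- stated objective: alternative
-- what changed: Replaces the split-on-opening-bracket-then-scan-each-chunk approach with a single left-to-right character scan driven by a current-buffer / seen-closing-bracket state machine.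
import Mathlib
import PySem

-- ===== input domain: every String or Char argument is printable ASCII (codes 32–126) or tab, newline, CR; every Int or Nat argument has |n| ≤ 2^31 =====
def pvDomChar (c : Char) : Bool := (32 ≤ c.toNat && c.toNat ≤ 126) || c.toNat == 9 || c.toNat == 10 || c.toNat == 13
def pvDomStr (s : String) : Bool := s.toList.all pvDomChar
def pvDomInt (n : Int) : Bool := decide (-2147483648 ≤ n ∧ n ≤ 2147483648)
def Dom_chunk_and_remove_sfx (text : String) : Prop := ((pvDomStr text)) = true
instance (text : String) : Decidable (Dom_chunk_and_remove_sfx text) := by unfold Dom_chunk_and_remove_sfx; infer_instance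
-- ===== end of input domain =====

-- B is a single-pass state-machine re-implementation of A's split-then-loop; same cost, different decomposition.

-- ===== PORT A =====
def chunk_and_remove_sfx (text : String) : List String :=
  let chunks_with_sfx := (PySem.Str.split? text "[").getD []   -- sep "[" is nonempty, so split? is always `some`
  chunks_with_sfx.foldl (fun chunks_without_sfx chunk_sfx =>
    let index_closing_bracket := PySem.Str.find chunk_sfx "]"
    if index_closing_bracket ≠ -1 then
      let remaining_chunk := PySem.Str.slice chunk_sfx (some (index_closing_bracket + 1)) none
      if remaining_chunk ≠ "" then chunks_without_sfx ++ [remaining_chunk] else chunks_without_sfx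
    else chunks_without_sfx ++ [chunk_sfx]) []

-- ===== PORT B =====
-- one machine step of Source B's loop: state = (result, current char buffer, saw_bracket)
def pvStep (st : List String × List Char × Bool) (ch : Char) : List String × List Char × Bool :=
  let (result, current, saw) := st
  if ch = '[' then
    ((if !saw || current ≠ [] then result ++ [String.ofList current] else result), [], false)
  else if ch = ']' then
    (if saw then (result, current ++ [ch], saw) else (result, [], true))
  else (result, current ++ [ch], saw)

def chunk_and_remove_sfx_alt (text : String) : List String :=
  match text.toList.foldl pvStep ([], [], false) with
  | (result, current, saw) =>
    if !saw || current ≠ [] then result ++ [String.ofList current] else result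

-- ===== PRECONDITION & SPEC =====
def Spec_chunk_and_remove_sfx (text : String) (out : List String) : Prop := out = chunk_and_remove_sfx_alt text
instance (text : String) (out : List String) : Decidable (Spec_chunk_and_remove_sfx text out) := by unfold Spec_chunk_and_remove_sfx; infer_instance

-- ===== CLAIM (what is proved, stated in full; the proofs are below) =====
def Claim_equal_chunk_and_remove_sfx : Prop := ∀ (text : String), Dom_chunk_and_remove_sfx text → Spec_chunk_and_remove_sfx text (chunk_and_remove_sfx text)

-- ===== LEMMAS AND PROOFS =====

-- the suffix after the first ']' ([], if there is none)
def afterBr : List Char → List Char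
  | [] => []
  | a :: l => if a = ']' then l else afterBr l

-- what one (partial) chunk contributes, given the machine state (saw, cur) at its start
def procP : Bool → List Char → List Char → List (List Char)
  | true, cur, k => if cur ++ k ≠ [] then [cur ++ k] else []
  | false, cur, k => if ']' ∈ k then (if afterBr k ≠ [] then [afterBr k] else []) else [cur ++ k]

def proc (k : List Char) : List (List Char) := procP false [] k

-- structural split on '['
def splitC : List Char → List (List Char)
  | [] => [[]]
  | a :: l =>
    match splitC l with
    | [] => []
    | k :: ks => if a = '[' then [] :: k :: ks else (a :: k) :: ks

-- A's per-chunk contribution, as a list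
def gA (chunk_sfx : String) : List String :=
  if PySem.Str.find chunk_sfx "]" ≠ -1 then
    (if PySem.Str.slice chunk_sfx (some (PySem.Str.find chunk_sfx "]" + 1)) none ≠ "" then
      [PySem.Str.slice chunk_sfx (some (PySem.Str.find chunk_sfx "]" + 1)) none] else [])
  else [chunk_sfx]

theorem splitC_ne_nil (l : List Char) : splitC l ≠ [] := by
  induction l with
  | nil => simp [splitC]
  | cons a l ih =>
    simp only [splitC]
    cases h : splitC l with
    | nil => exact absurd h ih
    | cons k ks => by_cases ha : a = '[' <;> simp [ha]

theorem splitOn_go_eq (fuel : ℕ) : ∀ (l cur : List Char) (acc : List (List Char)),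
    l.length ≤ fuel →
    PySem.Chars.splitOn.go ['['] fuel l cur acc =
      acc.reverse ++ (match splitC l with
        | [] => []
        | k :: ks => (cur.reverse ++ k) :: ks) := by
  induction fuel with
  | zero =>
    intro l cur acc h
    have hl : l = [] := by cases l <;> simp_all
    subst hl
    rw [PySem.Chars.splitOn.go.eq_def]
    simp [splitC]
  | succ fuel ih =>
    intro l cur acc h
    cases l with
    | nil => rw [PySem.Chars.splitOn.go.eq_def]; simp [splitC]
    | cons a t =>
      rw [PySem.Chars.splitOn.go.eq_def]
      simp only [List.isPrefixOf, Bool.and_true]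
      by_cases ha : a = '['
      · subst ha
        simp only [beq_self_eq_true, if_pos, List.length_cons,
          List.length_nil, List.drop_succ_cons, List.drop_zero]
        rw [ih t [] (cur.reverse :: acc) (by simpa using h)]
        cases hk : splitC t with
        | nil => exact absurd hk (splitC_ne_nil t)
        | cons k ks => simp [splitC, hk]
      · have hba : ('[' == a) = false := by
          simp only [beq_eq_false_iff_ne]; exact fun hh => ha hh.symm
        simp only [hba, Bool.false_eq_true, if_neg, not_false_iff]
        rw [ih t (a :: cur) acc (by simpa using h)]
        cases hk : splitC t with
        | nil => exact absurd hk (splitC_ne_nil t)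
        | cons k ks => simp [splitC, hk, ha]

theorem splitOn_eq (l : List Char) : PySem.Chars.splitOn l ['['] = splitC l := by
  rw [PySem.Chars.splitOn, splitOn_go_eq (l.length + 1) l [] [] (by omega)]
  cases hk : splitC l with
  | nil => exact absurd hk (splitC_ne_nil l)
  | cons k ks => simp

theorem find_go_not_mem : ∀ (l : List Char) (k : ℕ), ']' ∉ l →
    PySem.Chars.find.go [']'] l k = -1 := by
  intro l
  induction l with
  | nil => intro k _; rw [PySem.Chars.find.go.eq_def]; simp
  | cons a t ih =>
    intro k h
    rw [PySem.Chars.find.go.eq_def]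
    have ha : a ≠ ']' := fun hh => h (by simp [hh])
    have hba : (']' == a) = false := by
      simp only [beq_eq_false_iff_ne]; exact fun hh => ha hh.symm
    simp only [List.isPrefixOf, hba, Bool.false_and, Bool.false_eq_true, if_neg,
      not_false_iff]
    exact ih (k + 1) (fun hh => h (by simp [hh]))

theorem find_go_mem : ∀ (l : List Char) (k : ℕ), ']' ∈ l →
    ∃ j : ℕ, PySem.Chars.find.go [']'] l k = ((k + j : ℕ) : ℤ) ∧ l.drop (j + 1) = afterBr l := by
  intro l
  induction l with
  | nil => intro k h; simp at h
  | cons a t ih =>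
    intro k h
    rw [PySem.Chars.find.go.eq_def]
    by_cases ha : a = ']'
    · subst ha
      refine ⟨0, ?_, ?_⟩
      · simp [List.isPrefixOf]
      · simp [afterBr]
    · have hmem : ']' ∈ t := by
        rcases List.mem_cons.mp h with h1 | h1
        · exact absurd h1.symm ha
        · exact h1
      have hba : (']' == a) = false := by
        simp only [beq_eq_false_iff_ne]; exact fun hh => ha hh.symm
      simp only [List.isPrefixOf, hba, Bool.false_and, Bool.false_eq_true, if_neg,
        not_false_iff]
      obtain ⟨j, hj1, hj2⟩ := ih (k + 1) hmem
      refine ⟨j + 1, ?_, ?_⟩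
      · rw [hj1]; push_cast; ring
      · simpa [afterBr, ha] using hj2

theorem gA_eq (k : List Char) : gA (String.ofList k) = (proc k).map String.ofList := by
  have hfind : PySem.Str.find (String.ofList k) "]" = PySem.Chars.find k [']'] := by
    rw [PySem.Str.find_eq, String.toList_ofList]
    rfl
  by_cases hm : ']' ∈ k
  · obtain ⟨j, hj1, hj2⟩ := find_go_mem k 0 hm
    have hf : PySem.Str.find (String.ofList k) "]" = (j : ℤ) := by
      rw [hfind, PySem.Chars.find, hj1]; simp
    have hslice : PySem.Str.slice (String.ofList k) (some ((j : ℤ) + 1)) none =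
        String.ofList (afterBr k) := by
      unfold PySem.Str.slice
      rw [String.toList_ofList]
      have h1 : ((j : ℤ) + 1) = ((j + 1 : ℕ) : ℤ) := by push_cast; ring
      rw [PySem.Chars.slice_eq_listSlice, h1, PySem.List.slice_from_natCast, hj2]
    simp only [gA, hf, hslice]
    have hne : (j : ℤ) ≠ -1 := by omega
    simp only [hne, ne_eq, not_false_iff, if_pos]
    rw [proc]
    by_cases hv : afterBr k = []
    · simp [hv, procP, hm]
    · simp [hv, procP, hm]
  · have hf : PySem.Str.find (String.ofList k) "]" = -1 := by
      rw [hfind, PySem.Chars.find]; exact find_go_not_mem k 0 hm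
    simp only [gA, hf]
    simp [proc, procP, hm]

theorem A_eq (text : String) :
    chunk_and_remove_sfx text = ((splitC text.toList).flatMap proc).map String.ofList := by
  have hsplit : (PySem.Str.split? text "[").getD [] = (splitC text.toList).map String.ofList := by
    unfold PySem.Str.split?
    have : ("[" : String).toList = ['['] := by decide
    rw [this]
    simp [PySem.Chars.split?, splitOn_eq]
  have hbody : (fun (chunks_without_sfx : List String) (chunk_sfx : String) =>
      let index_closing_bracket := PySem.Str.find chunk_sfx "]"
      if index_closing_bracket ≠ -1 then
        let remaining_chunk := PySem.Str.slice chunk_sfx (some (index_closing_bracket + 1)) none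
        if remaining_chunk ≠ "" then chunks_without_sfx ++ [remaining_chunk]
        else chunks_without_sfx
      else chunks_without_sfx ++ [chunk_sfx])
      = fun acc c => acc ++ gA c := by
    funext acc c
    simp only [gA]
    split_ifs <;> simp
  unfold chunk_and_remove_sfx
  rw [hbody, hsplit, PySem.List.foldl_append_eq_flatMap gA _ []]
  rw [List.flatMap_map, List.nil_append]
  have : (fun k => gA (String.ofList k)) = fun k => (proc k).map String.ofList := by
    funext k; exact gA_eq k
  rw [this, ← List.map_flatMap]

theorem procP_nil (saw : Bool) (cur : List Char) :
    procP saw cur [] = if !saw || cur ≠ [] then [cur] else [] := by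
  cases saw <;> simp [procP]

theorem procP_other (a : Char) (ha : a ≠ ']') (saw : Bool) (cur k : List Char) :
    procP saw (cur ++ [a]) k = procP saw cur (a :: k) := by
  cases saw <;> simp [procP, afterBr, ha, Ne.symm ha]

theorem procP_close_true (cur k : List Char) :
    procP true (cur ++ [']']) k = procP true cur (']' :: k) := by
  simp [procP]

theorem procP_close_false (cur k : List Char) :
    procP true [] k = procP false cur (']' :: k) := by
  simp [procP, afterBr]

-- the machine, run from any state, against the split/flatMap description
theorem machine_spec : ∀ (cs : List Char) (res : List String) (cur : List Char) (saw : Bool),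
    (match cs.foldl pvStep (res, cur, saw) with
     | (r, c, s) => if !s || c ≠ [] then r ++ [String.ofList c] else r)
    = res ++ (match splitC cs with
        | [] => []
        | k :: ks => procP saw cur k ++ ks.flatMap proc).map String.ofList := by
  intro cs
  induction cs with
  | nil =>
    intro res cur saw
    simp only [List.foldl_nil, splitC, procP_nil]
    cases saw <;> by_cases hc : cur = [] <;> simp [hc]
  | cons a cs ih =>
    intro res cur saw
    cases hk : splitC cs with
    | nil => exact absurd hk (splitC_ne_nil cs)
    | cons k ks =>
      rw [List.foldl_cons]
      by_cases ha : a = '['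
      · subst ha
        rw [show pvStep (res, cur, saw) '[' =
            ((if !saw || cur ≠ [] then res ++ [String.ofList cur] else res), [], false) from by
          simp [pvStep], ih _ [] false]
        simp only [splitC, hk]
        cases saw <;> by_cases hc : cur = [] <;>
          simp [hc, procP_nil, proc, List.map_append, List.append_assoc]
      · by_cases hb : a = ']'
        · subst hb
          rw [show pvStep (res, cur, saw) ']' =
              (if saw then (res, cur ++ [']'], saw) else (res, [], true)) from by
            simp [pvStep]]
          cases saw with
          | true =>
            rw [if_pos rfl, ih res (cur ++ [']']) true]
            simp [splitC, hk, ← procP_close_true]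
          | false =>
            rw [if_neg (by simp), ih res [] true]
            simp [splitC, hk, ← procP_close_false cur k]
        · rw [show pvStep (res, cur, saw) a = (res, cur ++ [a], saw) from by
            simp [pvStep, ha, hb], ih res (cur ++ [a]) saw]
          simp [splitC, hk, ha, ← procP_other a hb saw cur k]

theorem B_eq (text : String) :
    chunk_and_remove_sfx_alt text = ((splitC text.toList).flatMap proc).map String.ofList := by
  have h := machine_spec text.toList [] [] false
  refine Eq.trans h ?_
  cases hk : splitC text.toList with
  | nil => exact absurd hk (splitC_ne_nil text.toList)
  | cons k ks => simp [proc]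

-- ===== VERDICT (by name: the statement is the Claim_ definition above) =====
theorem chunk_and_remove_sfx_spec : Claim_equal_chunk_and_remove_sfx := by
  intro text _
  unfold Spec_chunk_and_remove_sfx
  rw [A_eq, B_eq]
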